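-- pv_equiv track=rewrite | github.com/dataelement/bisheng-rt | src/backends/dataelem_python_backend/src/alg/ocr_process.py | merge_texts
-- ===== SOURCE A (Python) =====
-- def merge_texts(reg_texts, groups, delimitor=''):
--     merge_reg_texts = []
--     curr_val = reg_texts[0]
--     curr_group = groups[0]
--     for index in range(1, len(reg_texts)):
--         if groups[index] == curr_group:
--             curr_val += delimitor
--             curr_val += reg_texts[index]
--         else:
--             merge_reg_texts.append(curr_val)
--             curr_group = groups[index]
--             curr_val = reg_texts[index]
--
--     merge_reg_texts.append(curr_val)
--     return merge_reg_texts
-- ===== SOURCE B (Python) =====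
-- def merge_texts(reg_texts, groups, delimitor=''):
--     # Two-pointer scan: find each maximal run of equal group values, join its slice.
--     out = []
--     n = len(reg_texts)
--     i = 0
--     while i < n:
--         j = i + 1
--         while j < n and groups[j] == groups[i]:
--             j += 1
--         out.append(delimitor.join(reg_texts[i:j]))
--         i = j
--     return out
-- ===== Notes on version B (the rewrite author's own statement) =====
-- stated objective: alternative
-- what changed: Replaces A's running-accumulator loop (flushing curr_val on each group change) by a two-pointer scan that locates each maximal run of equal group values and emits delimitor.join of the corresponding slice.
import Mathlib
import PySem

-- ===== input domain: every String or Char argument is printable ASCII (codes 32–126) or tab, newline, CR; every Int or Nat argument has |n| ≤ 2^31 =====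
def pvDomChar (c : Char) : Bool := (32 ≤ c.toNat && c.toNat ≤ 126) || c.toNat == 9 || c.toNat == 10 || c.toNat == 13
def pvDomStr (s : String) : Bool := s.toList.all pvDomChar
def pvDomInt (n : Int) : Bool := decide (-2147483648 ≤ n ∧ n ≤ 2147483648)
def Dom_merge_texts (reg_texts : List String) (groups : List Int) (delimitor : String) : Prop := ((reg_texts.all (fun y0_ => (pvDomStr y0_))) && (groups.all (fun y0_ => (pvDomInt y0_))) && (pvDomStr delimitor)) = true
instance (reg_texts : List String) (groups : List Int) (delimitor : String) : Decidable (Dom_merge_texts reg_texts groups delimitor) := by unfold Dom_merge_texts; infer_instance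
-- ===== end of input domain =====

-- B replaces A's running-accumulator flush loop by a two-pointer scan over maximal runs of
-- equal group values, joining each run's slice (objective: alternative, same cost).

-- ===== PORT A =====
def merge_texts (reg_texts : List String) (groups : List Int) (delimitor : String) : List String :=
  let curr_val := (PySem.List.pyGet? reg_texts 0).getD ""
  let curr_group := (PySem.List.pyGet? groups 0).getD 0
  let st := (PySem.List.pyRange 1 (reg_texts.length : Int)).foldl
    (fun (st : List String × Int × String) index =>
      if (PySem.List.pyGet? groups index).getD 0 == st.2.1 then
        (st.1, st.2.1, st.2.2 ++ delimitor ++ (PySem.List.pyGet? reg_texts index).getD "")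
      else
        (st.1 ++ [st.2.2], (PySem.List.pyGet? groups index).getD 0,
          (PySem.List.pyGet? reg_texts index).getD ""))
    ([], curr_group, curr_val)
  st.1 ++ [st.2.2]

-- ===== PORT B =====
-- inner while loop: advance j while j < n and groups[j] == groups[i]
def bInner (groups : List Int) (i n j : Nat) : Nat :=
  if decide (j < n) && ((PySem.List.pyGet? groups (j : Int)).getD 0 == (PySem.List.pyGet? groups (i : Int)).getD 0)
  then bInner groups i n (j + 1) else j
termination_by n - j
decreasing_by simp_all; omega

-- (termination fact for the outer loop, cited in its decreasing_by)
lemma le_bInner (groups : List Int) (i n j : Nat) : j ≤ bInner groups i n j := by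
  fun_induction bInner <;> omega

-- outer while loop: emit one joined run, continue at j
def bOuter (reg_texts : List String) (groups : List Int) (delimitor : String) (n i : Nat) : List String :=
  if i < n then
    let j := bInner groups i n (i + 1)
    PySem.Str.join delimitor (PySem.List.slice reg_texts (some (i : Int)) (some (j : Int)))
      :: bOuter reg_texts groups delimitor n j
  else []
termination_by n - i
decreasing_by have := le_bInner groups i n (i + 1); omega

def merge_texts_alt (reg_texts : List String) (groups : List Int) (delimitor : String) : List String :=
  bOuter reg_texts groups delimitor reg_texts.length 0

-- ===== PRECONDITION & SPEC =====
-- Pre_ is exactly where the Python A returns: it reads reg_texts[0] and groups[0..len(reg_texts)-1],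
-- so it raises IndexError iff reg_texts is empty or groups is shorter than reg_texts.
def Pre_merge_texts (reg_texts : List String) (groups : List Int) (delimitor : String) : Prop :=
  reg_texts ≠ [] ∧ reg_texts.length ≤ groups.length
instance (reg_texts : List String) (groups : List Int) (delimitor : String) : Decidable (Pre_merge_texts reg_texts groups delimitor) := by unfold Pre_merge_texts; infer_instance

def pvWitness_merge_texts : List String × List Int × String := (["ab", "c", "d"], [1, 1, 2], "-")

def Spec_merge_texts (reg_texts : List String) (groups : List Int) (delimitor : String) (out : List String) : Prop := out = merge_texts_alt reg_texts groups delimitor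
instance (reg_texts : List String) (groups : List Int) (delimitor : String) (out : List String) : Decidable (Spec_merge_texts reg_texts groups delimitor out) := by unfold Spec_merge_texts; infer_instance

-- ===== CLAIM (what is proved, stated in full; the proofs are below) =====
def Claim_equal_merge_texts : Prop := ∀ (reg_texts : List String) (groups : List Int) (delimitor : String), Dom_merge_texts reg_texts groups delimitor → Pre_merge_texts reg_texts groups delimitor → Spec_merge_texts reg_texts groups delimitor (merge_texts reg_texts groups delimitor)

-- ===== LEMMAS AND PROOFS =====

-- reference shape: the list of merged runs, consuming texts and groups in lockstep
def runs (d : String) (cv : String) (cg : Int) : List String → List Int → List String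
  | [], _ => [cv]
  | _ :: _, [] => [cv]
  | t :: ts, g :: gs => if g = cg then runs d (cv ++ d ++ t) cg ts gs else cv :: runs d t g ts gs

-- joining a snoc (Chars level, then Strings)
lemma charsJoinSnoc (sep p : List Char) :
    ∀ ls : List (List Char), ls ≠ [] →
      PySem.Chars.join sep (ls ++ [p]) = PySem.Chars.join sep ls ++ sep ++ p := by
  intro ls
  induction ls with
  | nil => simp
  | cons q rest ih =>
    intro _
    cases rest with
    | nil =>
      simp [PySem.Chars.join_cons_cons, PySem.Chars.join_singleton, List.append_assoc]
    | cons r rest2 =>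
      have h := ih (by simp)
      simp only [List.cons_append] at h ⊢
      simp only [PySem.Chars.join_cons_cons, h, List.append_assoc]

lemma joinSnoc (d x : String) (xs : List String) (h : xs ≠ []) :
    PySem.Str.join d (xs ++ [x]) = PySem.Str.join d xs ++ d ++ x := by
  apply String.toList_inj.mp
  simp only [PySem.Str.toList_join, String.toList_append, List.map_append, List.map_cons,
    List.map_nil]
  exact charsJoinSnoc d.toList x.toList (xs.map String.toList) (by simpa using h)

lemma joinSingleton (d t : String) : PySem.Str.join d [t] = t := by
  apply String.toList_inj.mp
  simp [PySem.Str.toList_join, PySem.Chars.join_singleton]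

lemma sliceSingleton (ts : List String) (i : Nat) (hi : i < ts.length) :
    PySem.List.slice ts (some (i : Int)) (some ((i + 1 : Nat) : Int)) = [ts[i]] := by
  have h1 : i + 1 - i = 1 := by omega
  rw [PySem.List.slice_natCast, h1, List.drop_eq_getElem_cons hi]
  rfl

lemma sliceSnoc (ts : List String) (i j : Nat) (hij : i ≤ j) (hj : j < ts.length) :
    PySem.List.slice ts (some (i : Int)) (some ((j + 1 : Nat) : Int))
      = PySem.List.slice ts (some (i : Int)) (some (j : Int)) ++ [ts[j]] := by
  rw [PySem.List.slice_natCast, PySem.List.slice_natCast]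
  have h1 : j + 1 - i = (j - i) + 1 := by omega
  rw [h1, List.take_add_one]
  have h2 : (List.drop i ts)[j - i]? = some ts[j] := by
    rw [List.getElem?_drop]
    have h3 : i + (j - i) = j := by omega
    rw [h3, List.getElem?_eq_getElem hj]
  simp [h2]

lemma sliceNonempty (ts : List String) (i j : Nat) (hij : i < j) (hi : i < ts.length) :
    PySem.List.slice ts (some (i : Int)) (some (j : Int)) ≠ [] := by
  rw [PySem.List.slice_natCast]
  intro h
  have h2 := congrArg List.length h
  simp [List.length_take, List.length_drop] at h2
  omega

-- ===== A-side: the fold over range(1, n) computes `runs` =====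
lemma foldA (ts : List String) (gs : List Int) (d : String) (hlen : ts.length ≤ gs.length) :
    ∀ (k i : Nat), i + k = ts.length →
    ∀ (acc : List String) (cg : Int) (cv : String),
      (((PySem.List.pyRange (i : Int) (ts.length : Int)).foldl
        (fun (st : List String × Int × String) index =>
          if (PySem.List.pyGet? gs index).getD 0 == st.2.1 then
            (st.1, st.2.1, st.2.2 ++ d ++ (PySem.List.pyGet? ts index).getD "")
          else
            (st.1 ++ [st.2.2], (PySem.List.pyGet? gs index).getD 0,
              (PySem.List.pyGet? ts index).getD ""))
        (acc, cg, cv)).1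
      ++ [((PySem.List.pyRange (i : Int) (ts.length : Int)).foldl
        (fun (st : List String × Int × String) index =>
          if (PySem.List.pyGet? gs index).getD 0 == st.2.1 then
            (st.1, st.2.1, st.2.2 ++ d ++ (PySem.List.pyGet? ts index).getD "")
          else
            (st.1 ++ [st.2.2], (PySem.List.pyGet? gs index).getD 0,
              (PySem.List.pyGet? ts index).getD ""))
        (acc, cg, cv)).2.2])
      = acc ++ runs d cv cg (ts.drop i) (gs.drop i) := by
  intro k
  induction k with
  | zero =>
    intro i hi acc cg cv
    have h1 : PySem.List.pyRange (i : Int) (ts.length : Int) = [] :=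
      PySem.List.pyRange_one_eq_nil (by omega)
    have h2 : ts.drop i = [] := List.drop_eq_nil_of_le (by omega)
    rcases h3 : gs.drop i with _ | ⟨g, gsr⟩ <;> simp [h1, h2, runs]
  | succ k ih =>
    intro i hi acc cg cv
    have hilt : i < ts.length := by omega
    have hig : i < gs.length := by omega
    have h1 : PySem.List.pyRange (i : Int) (ts.length : Int)
        = (i : Int) :: PySem.List.pyRange ((i : Int) + 1) (ts.length : Int) :=
      PySem.List.pyRange_one_cons (by exact_mod_cast hilt)
    have hcast : ((i : Int) + 1) = (((i + 1 : Nat)) : Int) := by push_cast; ring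
    have hgetg : (PySem.List.pyGet? gs (i : Int)).getD 0 = gs[i] := by
      rw [PySem.List.pyGet?_natCast, List.getElem?_eq_getElem hig]; rfl
    have hgett : (PySem.List.pyGet? ts (i : Int)).getD "" = ts[i] := by
      rw [PySem.List.pyGet?_natCast, List.getElem?_eq_getElem hilt]; rfl
    have hdt : ts.drop i = ts[i] :: ts.drop (i + 1) := List.drop_eq_getElem_cons hilt
    have hdg : gs.drop i = gs[i] :: gs.drop (i + 1) := List.drop_eq_getElem_cons hig
    rw [h1]
    simp only [List.foldl_cons, hgetg, hgett, hcast]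
    by_cases hc : gs[i] = cg
    · rw [if_pos (by simpa using hc)]
      rw [ih (i + 1) (by omega) acc cg (cv ++ d ++ ts[i])]
      rw [hdt, hdg, runs, if_pos hc]
    · rw [if_neg (by simpa using hc)]
      rw [ih (i + 1) (by omega) (acc ++ [cv]) gs[i] ts[i]]
      rw [hdt, hdg, runs, if_neg hc]
      simp [List.append_assoc]

-- ===== B-side: bOuter computes `runs` =====
lemma bInner_unfold (gs : List Int) (i n j : Nat) :
    bInner gs i n j
      = if decide (j < n) && ((PySem.List.pyGet? gs (j : Int)).getD 0 == (PySem.List.pyGet? gs (i : Int)).getD 0)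
        then bInner gs i n (j + 1) else j := by
  rw [bInner]

lemma bOuter_unfold (ts : List String) (gs : List Int) (d : String) (n i : Nat) :
    bOuter ts gs d n i
      = if i < n then
          PySem.Str.join d (PySem.List.slice ts (some (i : Int)) (some ((bInner gs i n (i + 1) : Nat) : Int)))
            :: bOuter ts gs d n (bInner gs i n (i + 1))
        else [] := by
  rw [bOuter]

lemma innerExpand (ts : List String) (gs : List Int) (d : String)
    (hlen : ts.length ≤ gs.length) (i : Nat) (hi : i < ts.length)
    (hig : i < gs.length)
    (HL : ∀ i2, i < i2 → ∀ (h2 : i2 < ts.length),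
      bOuter ts gs d ts.length i2
        = runs d (ts[i2]'h2) (gs[i2]'(by omega)) (ts.drop (i2 + 1)) (gs.drop (i2 + 1))) :
    ∀ (k j : Nat), j + k = ts.length → i < j →
      runs d (PySem.Str.join d (PySem.List.slice ts (some (i : Int)) (some (j : Int)))) (gs[i]'hig)
          (ts.drop j) (gs.drop j)
        = PySem.Str.join d (PySem.List.slice ts (some (i : Int))
            (some ((bInner gs i ts.length j : Nat) : Int)))
          :: bOuter ts gs d ts.length (bInner gs i ts.length j) := by
  intro k
  induction k with
  | zero =>
    intro j hj hij
    have hjn : j = ts.length := by omega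
    have hb : bInner gs i ts.length j = j := by
      rw [bInner_unfold]; simp [hjn]
    have h2 : ts.drop j = [] := List.drop_eq_nil_of_le (by omega)
    have hbo : bOuter ts gs d ts.length j = [] := by rw [bOuter_unfold]; simp [hjn]
    rcases h3 : gs.drop j with _ | ⟨g, gsr⟩ <;> simp [hb, h2, runs, hbo]
  | succ k ih =>
    intro j hj hij
    have hjn : j < ts.length := by omega
    have hjg : j < gs.length := by omega
    have hgetj : (PySem.List.pyGet? gs (j : Int)).getD 0 = gs[j] := by
      rw [PySem.List.pyGet?_natCast, List.getElem?_eq_getElem hjg]; rfl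
    have hgeti : (PySem.List.pyGet? gs (i : Int)).getD 0 = gs[i] := by
      rw [PySem.List.pyGet?_natCast, List.getElem?_eq_getElem hig]; rfl
    have hdt : ts.drop j = ts[j] :: ts.drop (j + 1) := List.drop_eq_getElem_cons hjn
    have hdg : gs.drop j = gs[j] :: gs.drop (j + 1) := List.drop_eq_getElem_cons hjg
    by_cases hc : gs[j] = gs[i]
    · have hb : bInner gs i ts.length j = bInner gs i ts.length (j + 1) := by
        rw [bInner_unfold, hgetj, hgeti]
        simp [hjn, hc]
      rw [hdt, hdg, runs, if_pos hc, hb]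
      rw [← joinSnoc d ts[j] _ (sliceNonempty ts i j hij hi), ← sliceSnoc ts i j (by omega) hjn]
      exact ih (j + 1) (by omega) (by omega)
    · have hb : bInner gs i ts.length j = j := by
        rw [bInner_unfold, hgetj, hgeti]
        simp [hc]
      rw [hdt, hdg, runs, if_neg hc, hb, HL j hij hjn]

lemma bOuter_runs (ts : List String) (gs : List Int) (d : String)
    (hlen : ts.length ≤ gs.length) :
    ∀ (k i : Nat), ts.length - i ≤ k → ∀ (h2 : i < ts.length),
      bOuter ts gs d ts.length i
        = runs d (ts[i]'h2) (gs[i]'(by omega)) (ts.drop (i + 1)) (gs.drop (i + 1)) := by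
  intro k
  induction k with
  | zero => intro i hk h2; omega
  | succ k ih =>
    intro i hk h2
    have HL : ∀ i2, i < i2 → ∀ (h3 : i2 < ts.length),
        bOuter ts gs d ts.length i2
          = runs d (ts[i2]'h3) (gs[i2]'(by omega)) (ts.drop (i2 + 1)) (gs.drop (i2 + 1)) := by
      intro i2 hii hi2
      exact ih i2 (by omega) hi2
    have hM := innerExpand ts gs d hlen i h2 (by omega) HL (ts.length - (i + 1)) (i + 1)
      (by omega) (by omega)
    rw [bOuter_unfold, if_pos h2, ← hM, sliceSingleton ts i h2, joinSingleton]

-- ===== final assembly =====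
theorem merge_texts_spec : Claim_equal_merge_texts := by
  intro ts gs d _ hpre
  obtain ⟨hne, hlen⟩ := hpre
  have hn : 0 < ts.length := List.length_pos_iff.mpr hne
  have hg : 0 < gs.length := by omega
  have hgetg : (PySem.List.pyGet? gs 0).getD 0 = gs[0] := by
    rw [PySem.List.pyGet?_zero, List.getElem?_eq_getElem hg]; rfl
  have hgett : (PySem.List.pyGet? ts 0).getD "" = ts[0] := by
    rw [PySem.List.pyGet?_zero, List.getElem?_eq_getElem hn]; rfl
  have hfold := foldA ts gs d hlen (ts.length - 1) 1 (by omega) [] gs[0] ts[0]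
  simp only [Nat.cast_one] at hfold
  have houter := bOuter_runs ts gs d hlen ts.length 0 (by omega) hn
  unfold Spec_merge_texts merge_texts merge_texts_alt
  simp only [hgetg, hgett]
  rw [hfold, houter]
  simp
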